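-- pv_equiv track=rewrite | github.com/giladondon/ANONA | AnonaAI/featuresMaker.py | punctuation_marks
-- ===== SOURCE A (Python) =====
-- ENTER_KEY_CODE = 13
--
-- PUNCTUATION_CODES = list(range(33, 48)) + list(range(58, 65)) + list(range(91, 97)) + list(range(123, 154))
--
-- def punctuation_marks(od):
--     """
--     :param od: key data of user ending with enter(key code 13).
--     :return:
--     :type od: ordered dictionary
--     """
--     punctuation_ratio = []
--
--     punctuation_count = 0
--     key_count = 0
--
--     for item in od:
--         key_count += 1
--
--         if item in PUNCTUATION_CODES:
--             punctuation_count += 1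
--
--         if item == ENTER_KEY_CODE:
--             punctuation_ratio.append((punctuation_count, key_count))
--             key_count = 0
--             punctuation_count = 0
--
--     return punctuation_ratio
-- ===== SOURCE B (Python) =====
-- ENTER_KEY_CODE = 13
--
-- PUNCTUATION_CODES = list(range(33, 48)) + list(range(58, 65)) + list(range(91, 97)) + list(range(123, 154))
--
-- _PUNCT_SET = set(PUNCTUATION_CODES)
--
-- def punctuation_marks(od):
--     # Phase 1: partition into complete segments, each ending with the enter key.
--     segments = []
--     current = []
--     for item in od:
--         current.append(item)
--         if item == ENTER_KEY_CODE:
--             segments.append(current)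
--             current = []
--     # leftover items after the final enter are discarded
--     # Phase 2: map each segment to (punctuation count, length).
--     return [(sum(1 for x in seg if x in _PUNCT_SET), len(seg)) for seg in segments]
-- ===== Notes on version B (the rewrite author's own statement) =====
-- stated objective: faster
-- what changed: Replaces the incremental counter loop (per-item counters reset on enter) with an explicit two-phase partition-then-aggregate: first split the stream into enter-terminated segments, then map each segment to its (punctuation count, length) pair using a precomputed set for the punctuation membership test.
import Mathlib
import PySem

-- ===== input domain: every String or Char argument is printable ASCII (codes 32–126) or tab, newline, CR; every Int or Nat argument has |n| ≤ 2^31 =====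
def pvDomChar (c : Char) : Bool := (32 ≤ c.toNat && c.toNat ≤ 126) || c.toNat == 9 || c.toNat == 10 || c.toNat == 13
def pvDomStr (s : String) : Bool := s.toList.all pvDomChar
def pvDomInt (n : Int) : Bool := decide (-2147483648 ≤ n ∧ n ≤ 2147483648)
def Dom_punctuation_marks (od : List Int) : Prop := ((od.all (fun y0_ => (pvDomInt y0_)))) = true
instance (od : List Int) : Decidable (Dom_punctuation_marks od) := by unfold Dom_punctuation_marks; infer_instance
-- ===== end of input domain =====

-- B replaces A's incremental counter loop by an explicit partition-into-segments
-- phase followed by a per-segment aggregation map, with a set for the punctuation membership test.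

-- ===== PORT A =====
def PUNCTUATION_CODES : List Int :=
  PySem.List.pyRange 33 48 1 ++ PySem.List.pyRange 58 65 1 ++
  PySem.List.pyRange 91 97 1 ++ PySem.List.pyRange 123 154 1

-- A's single pass: state = (punctuation_ratio, punctuation_count, key_count)
def punctuation_marks (od : List Int) : List (Int × Int) :=
  (od.foldl (fun (st : List (Int × Int) × Int × Int) item =>
      let kc := st.2.2 + 1
      let pc := if PUNCTUATION_CODES.contains item then st.2.1 + 1 else st.2.1
      if item == 13 then (st.1 ++ [(pc, kc)], 0, 0) else (st.1, pc, kc))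
    ([], 0, 0)).1

-- ===== PORT B =====
-- phase 1: split od into complete enter-terminated segments (enter included);
-- leftover items after the final enter are discarded
def pvSegments : List Int → List Int → List (List Int)
  | _, [] => []
  | cur, x :: xs =>
    if x == 13 then (cur ++ [x]) :: pvSegments [] xs else pvSegments (cur ++ [x]) xs

def pvPunctSet : PySem.Set Int := PySem.Set.ofList PUNCTUATION_CODES

-- phase 2: map each segment to (punctuation count, length)
def punctuation_marks_alt (od : List Int) : List (Int × Int) :=
  (pvSegments [] od).map (fun seg =>
    (((seg.filter (fun x => pvPunctSet.contains x)).length : Int), (seg.length : Int)))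

-- ===== PRECONDITION & SPEC =====
def Spec_punctuation_marks (od : List Int) (out : List (Int × Int)) : Prop := out = punctuation_marks_alt od
instance (od : List Int) (out : List (Int × Int)) : Decidable (Spec_punctuation_marks od out) := by unfold Spec_punctuation_marks; infer_instance

-- ===== CLAIM (what is proved, stated in full; the proofs are below) =====
def Claim_equal_punctuation_marks : Prop := ∀ (od : List Int), Dom_punctuation_marks od → Spec_punctuation_marks od (punctuation_marks od)

-- ===== LEMMAS AND PROOFS =====

-- the two membership tests agree (same underlying distinct codes)
lemma punct_mem (x : Int) : pvPunctSet.contains x = PUNCTUATION_CODES.contains x := by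
  simp [pvPunctSet, PySem.Set.contains, PySem.Set.mem_ofList]

-- B's per-segment aggregate, with the membership test normalized to the list form
def gF (seg : List Int) : Int × Int :=
  (((seg.filter (fun x => PUNCTUATION_CODES.contains x)).length : Int), (seg.length : Int))

set_option maxRecDepth 4096 in
lemma alt_eq_gF (od : List Int) : punctuation_marks_alt od = (pvSegments [] od).map gF := by
  unfold punctuation_marks_alt gF
  simp only [punct_mem]

lemma h13 : PUNCTUATION_CODES.contains (13 : Int) = false := by decide

-- main loop invariant: A's fold, started with counters matching the open segment `cur`,
-- produces acc ++ the per-segment aggregates of B's segmentation of the rest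
lemma loop_inv (od : List Int) : ∀ (cur : List Int) (acc : List (Int × Int)),
    (od.foldl (fun (st : List (Int × Int) × Int × Int) item =>
        let kc := st.2.2 + 1
        let pc := if PUNCTUATION_CODES.contains item then st.2.1 + 1 else st.2.1
        if item == 13 then (st.1 ++ [(pc, kc)], 0, 0) else (st.1, pc, kc))
      (acc, ((cur.filter (fun x => PUNCTUATION_CODES.contains x)).length : Int), (cur.length : Int))).1
    = acc ++ (pvSegments cur od).map gF := by
  induction od with
  | nil => intro cur acc; simp [pvSegments]
  | cons x xs ih =>
    intro cur acc
    by_cases hx : x = 13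
    · subst hx
      have hseg : gF (cur ++ [(13 : Int)]) =
          (((cur.filter (fun x => PUNCTUATION_CODES.contains x)).length : Int), (cur.length : Int) + 1) := by
        simp [gF, List.filter_append]
      simp only [List.foldl_cons, pvSegments, List.map_cons, h13, beq_self_eq_true, if_true,
        if_false, Bool.false_eq_true, hseg]
      have := ih [] (acc ++ [(((cur.filter (fun x => PUNCTUATION_CODES.contains x)).length : Int), (cur.length : Int) + 1)])
      simp only [List.filter_nil, List.length_nil, Int.natCast_zero, List.append_assoc,
        List.singleton_append] at this ⊢
      exact this
    · have hxb : (x == (13 : Int)) = false := by simp [hx]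
      simp only [List.foldl_cons, pvSegments, hxb, if_false, Bool.false_eq_true]
      have := ih (cur ++ [x]) acc
      simp only [List.filter_append, List.length_append, List.filter_cons, List.filter_nil] at this
      by_cases hp : PUNCTUATION_CODES.contains x = true
      · simp only [hp, if_true] at this ⊢
        simpa [Nat.cast_add] using this
      · simp only [hp, if_false, Bool.false_eq_true] at this ⊢
        simpa [Nat.cast_add] using this

-- ===== VERDICT (by name: the statement is the Claim_ definition above) =====
theorem punctuation_marks_spec : Claim_equal_punctuation_marks := by
  intro od _
  show punctuation_marks od = punctuation_marks_alt od
  rw [alt_eq_gF]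
  have := loop_inv od [] []
  simpa [punctuation_marks] using this
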